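-- pv_equiv track=rewrite | github.com/Drakvor/OSS-Knowledge_BrainClone | oss-knowledge-embedding-server/app/markdown/strategies/semantic_block_fusion.py | _themes_compatible
-- ===== SOURCE A (Python) =====
-- from typing import List, Dict, Any, Set
--
-- def _themes_compatible(theme1: Set[str], theme2: Set[str]) -> bool:
--     """Check if two themes are compatible for grouping."""
--     # Empty themes are compatible with anything
--     if not theme1 or not theme2:
--         return True
--
--     # Shared themes indicate compatibility
--     shared = theme1 & theme2
--     if shared:
--         return True
--
--     # Compatible theme pairs
--     compatible_pairs = [
--         ('code', 'technical'),
--         ('documentation', 'technical'),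
--         ('table', 'data'),
--         ('list', 'documentation')
--     ]
--
--     for t1, t2 in compatible_pairs:
--         if (t1 in theme1 and t2 in theme2) or (t2 in theme1 and t1 in theme2):
--             return True
--
--     return False
-- ===== SOURCE B (Python) =====
-- from typing import List, Dict, Any, Set
--
-- # Symmetric neighbor map derived from A's compatible pairs (both orientations).
-- _NEIGHBORS: Dict[str, Set[str]] = {
--     'code': {'technical'},
--     'technical': {'code', 'documentation'},
--     'documentation': {'technical', 'list'},
--     'table': {'data'},
--     'data': {'table'},
--     'list': {'documentation'},
-- }
--
-- def _themes_compatible(theme1: Set[str], theme2: Set[str]) -> bool: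
--     """Check if two themes are compatible for grouping."""
--     if not theme1 or not theme2:
--         return True
--     # Expand theme1 by its compatibility neighbors; one intersection test then
--     # covers both the shared-theme case and every compatible pair.
--     expanded = set(theme1)
--     for t in theme1:
--         expanded |= _NEIGHBORS.get(t, set())
--     return bool(expanded & theme2)
-- ===== Notes on version B (the rewrite author's own statement) =====
-- stated objective: alternative
-- what changed: Instead of a separate shared-theme intersection test plus a scan over a hard-coded list of compatible pairs, B expands theme1 into its compatibility closure (theme1 plus the neighbors of each of its elements under a symmetric adjacency dict) and decides with a single intersection against theme2.
import Mathlib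
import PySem

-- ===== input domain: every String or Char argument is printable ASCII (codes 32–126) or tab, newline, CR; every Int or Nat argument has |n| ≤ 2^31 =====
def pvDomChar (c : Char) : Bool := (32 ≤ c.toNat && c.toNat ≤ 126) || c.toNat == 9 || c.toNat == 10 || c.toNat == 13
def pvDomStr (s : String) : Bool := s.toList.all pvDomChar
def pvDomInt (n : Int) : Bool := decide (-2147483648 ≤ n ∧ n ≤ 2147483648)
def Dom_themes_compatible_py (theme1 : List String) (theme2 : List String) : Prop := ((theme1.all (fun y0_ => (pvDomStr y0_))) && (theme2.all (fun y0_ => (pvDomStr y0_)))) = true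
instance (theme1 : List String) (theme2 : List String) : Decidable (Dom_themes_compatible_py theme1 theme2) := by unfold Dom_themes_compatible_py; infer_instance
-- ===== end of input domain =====

-- B replaces A's shared-intersection test + scan over a hard-coded pair list by building
-- the compatibility closure of theme1 and doing one intersection with theme2 (alternative
-- decomposition, same cost).

-- ===== PORT A =====
-- the hard-coded compatible_pairs list of A
def pvPairsA : List (String × String) :=
  [("code", "technical"), ("documentation", "technical"), ("table", "data"), ("list", "documentation")]

def themes_compatible_py (theme1 : List String) (theme2 : List String) : Bool :=
  if theme1.isEmpty || theme2.isEmpty then true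
  else if !(PySem.Set.inter theme1 theme2).isEmpty then true
  else
    -- 'for t1, t2 in compatible_pairs: if …: return True' / 'return False' = any over the pair list
    pvPairsA.any (fun p =>
      (theme1.contains p.1 && theme2.contains p.2) || (theme1.contains p.2 && theme2.contains p.1))

-- ===== PORT B =====
-- the _NEIGHBORS adjacency dict of B (values are Python sets)
def pvNeighborsB : PySem.Dict String (PySem.Set String) :=
  PySem.Dict.ofList [("code", ["technical"]), ("technical", ["code", "documentation"]),
   ("documentation", ["technical", "list"]), ("table", ["data"]),
   ("data", ["table"]), ("list", ["documentation"])]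

def themes_compatible_py_alt (theme1 : List String) (theme2 : List String) : Bool :=
  if theme1.isEmpty || theme2.isEmpty then true
  else
    -- expanded = set(theme1); for t in theme1: expanded |= _NEIGHBORS.get(t, set())
    -- (iterating the Lean list for the Python set iteration is exact: the resulting SET
    -- does not depend on the iteration order)
    let expanded := theme1.foldl
      (fun acc t => PySem.Set.union acc (PySem.Dict.getD pvNeighborsB t []))
      (PySem.Set.ofList theme1)
    -- return bool(expanded & theme2)
    !(PySem.Set.inter expanded theme2).isEmpty

-- ===== PRECONDITION & SPEC =====
def Spec_themes_compatible_py (theme1 : List String) (theme2 : List String) (out : Bool) : Prop := out = themes_compatible_py_alt theme1 theme2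
instance (theme1 : List String) (theme2 : List String) (out : Bool) : Decidable (Spec_themes_compatible_py theme1 theme2 out) := by unfold Spec_themes_compatible_py; infer_instance

-- ===== CLAIM (what is proved, stated in full; the proofs are below) =====
def Claim_equal_themes_compatible_py : Prop := ∀ (theme1 : List String) (theme2 : List String), Dom_themes_compatible_py theme1 theme2 → Spec_themes_compatible_py theme1 theme2 (themes_compatible_py theme1 theme2)

-- ===== LEMMAS AND PROOFS =====

-- membership in B's neighbor lookup, characterised pointwise
theorem mem_neighbors (t x : String) :
    x ∈ PySem.Dict.getD pvNeighborsB t [] ↔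
      (t = "code" ∧ x = "technical")
    ∨ (t = "technical" ∧ (x = "code" ∨ x = "documentation"))
    ∨ (t = "documentation" ∧ (x = "technical" ∨ x = "list"))
    ∨ (t = "table" ∧ x = "data")
    ∨ (t = "data" ∧ x = "table")
    ∨ (t = "list" ∧ x = "documentation") := by
  by_cases h1 : t = "code"
  · subst h1
    have h : PySem.Dict.getD pvNeighborsB "code" [] = ["technical"] := by decide
    simp [h]
  by_cases h2 : t = "technical"
  · subst h2
    have h : PySem.Dict.getD pvNeighborsB "technical" [] = ["code", "documentation"] := by decide
    simp [h, h1]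
  by_cases h3 : t = "documentation"
  · subst h3
    have h : PySem.Dict.getD pvNeighborsB "documentation" [] = ["technical", "list"] := by decide
    simp [h, h1, h2]
  by_cases h4 : t = "table"
  · subst h4
    have h : PySem.Dict.getD pvNeighborsB "table" [] = ["data"] := by decide
    simp [h, h1, h2, h3]
  by_cases h5 : t = "data"
  · subst h5
    have h : PySem.Dict.getD pvNeighborsB "data" [] = ["table"] := by decide
    simp [h, h1, h2, h3, h4]
  by_cases h6 : t = "list"
  · subst h6
    have h : PySem.Dict.getD pvNeighborsB "list" [] = ["documentation"] := by decide
    simp [h, h1, h2, h3, h4, h5]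
  · have h : PySem.Dict.getD pvNeighborsB t [] = [] := by
      have b1 : ("code" == t) = false := beq_eq_false_iff_ne.mpr (Ne.symm h1)
      have b2 : ("technical" == t) = false := beq_eq_false_iff_ne.mpr (Ne.symm h2)
      have b3 : ("documentation" == t) = false := beq_eq_false_iff_ne.mpr (Ne.symm h3)
      have b4 : ("table" == t) = false := beq_eq_false_iff_ne.mpr (Ne.symm h4)
      have b5 : ("data" == t) = false := beq_eq_false_iff_ne.mpr (Ne.symm h5)
      have b6 : ("list" == t) = false := beq_eq_false_iff_ne.mpr (Ne.symm h6)
      have hitems : pvNeighborsB.items = [("code", ["technical"]), ("technical", ["code", "documentation"]),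
        ("documentation", ["technical", "list"]), ("table", ["data"]), ("data", ["table"]),
        ("list", ["documentation"])] := by decide
      simp [PySem.Dict.getD, PySem.Dict.get?, hitems, List.find?, b1, b2, b3, b4, b5, b6]
    simp [h, h1, h2, h3, h4, h5, h6]

-- membership in the foldl-union closure
theorem mem_closure (l : List String) (init : List String) (x : String) :
    x ∈ l.foldl (fun acc t => PySem.Set.union acc (PySem.Dict.getD pvNeighborsB t [])) init ↔
      x ∈ init ∨ ∃ t ∈ l, x ∈ PySem.Dict.getD pvNeighborsB t [] := by
  induction l generalizing init with
  | nil => simp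
  | cons a l ih =>
    simp only [List.foldl_cons, ih, PySem.Set.mem_union, List.mem_cons]
    constructor
    · rintro ((h | h) | ⟨t, ht, hx⟩)
      · exact Or.inl h
      · exact Or.inr ⟨a, Or.inl rfl, h⟩
      · exact Or.inr ⟨t, Or.inr ht, hx⟩
    · rintro (h | ⟨t, rfl | ht, hx⟩)
      · exact Or.inl (Or.inl h)
      · exact Or.inl (Or.inr hx)
      · exact Or.inr ⟨t, ht, hx⟩

-- nonempty intersection ↔ a common element
theorem inter_nonempty (s t : List String) :
    (!(PySem.Set.inter s t).isEmpty) = true ↔ ∃ x, x ∈ s ∧ x ∈ t := by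
  simp [PySem.Set.inter, List.filter_eq_nil_iff]

-- the non-trivial branches agree
theorem branches_eq (theme1 theme2 : List String) :
    ((!(PySem.Set.inter theme1 theme2).isEmpty) ||
      pvPairsA.any (fun p =>
        (theme1.contains p.1 && theme2.contains p.2) || (theme1.contains p.2 && theme2.contains p.1)))
    = (!(PySem.Set.inter
          (theme1.foldl (fun acc t => PySem.Set.union acc (PySem.Dict.getD pvNeighborsB t []))
            (PySem.Set.ofList theme1)) theme2).isEmpty) := by
  rw [Bool.eq_iff_iff]
  rw [inter_nonempty]
  simp only [Bool.or_eq_true, inter_nonempty, mem_closure, PySem.Set.mem_ofList,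
    pvPairsA, List.any_cons, List.any_nil, Bool.or_false, Bool.or_eq_true, Bool.and_eq_true,
    List.contains_iff_mem]
  constructor
  · rintro (⟨x, hx1, hx2⟩ | h)
    · exact ⟨x, Or.inl hx1, hx2⟩
    · rcases h with (⟨h1, h2⟩ | ⟨h1, h2⟩) | (⟨h1, h2⟩ | ⟨h1, h2⟩) | (⟨h1, h2⟩ | ⟨h1, h2⟩) | (⟨h1, h2⟩ | ⟨h1, h2⟩)
      · exact ⟨"technical", Or.inr ⟨"code", h1, (mem_neighbors _ _).2 (by tauto)⟩, h2⟩
      · exact ⟨"code", Or.inr ⟨"technical", h1, (mem_neighbors _ _).2 (by tauto)⟩, h2⟩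
      · exact ⟨"technical", Or.inr ⟨"documentation", h1, (mem_neighbors _ _).2 (by tauto)⟩, h2⟩
      · exact ⟨"documentation", Or.inr ⟨"technical", h1, (mem_neighbors _ _).2 (by tauto)⟩, h2⟩
      · exact ⟨"data", Or.inr ⟨"table", h1, (mem_neighbors _ _).2 (by tauto)⟩, h2⟩
      · exact ⟨"table", Or.inr ⟨"data", h1, (mem_neighbors _ _).2 (by tauto)⟩, h2⟩
      · exact ⟨"documentation", Or.inr ⟨"list", h1, (mem_neighbors _ _).2 (by tauto)⟩, h2⟩
      · exact ⟨"list", Or.inr ⟨"documentation", h1, (mem_neighbors _ _).2 (by tauto)⟩, h2⟩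
  · rintro ⟨x, hx1 | ⟨t, ht, hn⟩, hx2⟩
    · exact Or.inl ⟨x, hx1, hx2⟩
    · rw [mem_neighbors] at hn
      rcases hn with ⟨rfl, rfl⟩ | ⟨rfl, rfl | rfl⟩ | ⟨rfl, rfl | rfl⟩ | ⟨rfl, rfl⟩ | ⟨rfl, rfl⟩ | ⟨rfl, rfl⟩ <;>
        exact Or.inr (by tauto)

-- ===== VERDICT (by name: the statement is the Claim_ definition above) =====
theorem themes_compatible_py_spec : Claim_equal_themes_compatible_py := by
  intro theme1 theme2 _
  unfold Spec_themes_compatible_py themes_compatible_py themes_compatible_py_alt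
  by_cases hemp : (theme1.isEmpty || theme2.isEmpty) = true
  · simp [hemp]
  · rw [if_neg hemp, if_neg hemp, Bool.if_true_left]
    simp only [Bool.decide_eq_true]
    exact branches_eq theme1 theme2
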